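-- pv_equiv track=rewrite | github.com/IKAROSOO/CodingTest | Programmers/2022 KAKAO BLIND RECRUITMENT/92334/92334_01.py | solution
-- ===== SOURCE A (Python) =====
-- def solution(id_list, report, k):
--     id_dict = dict()            # 각 유저의 신고 성공을 저장하는 딕셔너리
--     report_dict = dict()        # 각 유저가 신고당한 횟수를 저장한는 딕셔너리
--     report = list(set(report))  # 중복으로 신고한 것을 제외
--     answer = []
--
--     for i in range(len(report)):
--         user, reported = report[i].split(" ")   # 신고자와 피신고자 구분분
--
--         if reported not in report_dict:         # 딕셔너리에 해당 유저가 없는 경우우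
--             report_dict[reported] = 1
--         else:
--             report_dict[reported] += 1
--
--     for reporting in report:
--         user, reported = reporting.split(" ")
--
--         if report_dict[reported] >= k:          # 피신고자의 누적 경고수가 기준을 넘을 경우
--             if user not in id_dict:
--                 id_dict[user] = 1
--                 continue
--             id_dict[user] += 1
--
--     for user in id_list:
--         if user not in id_dict:
--             answer.append(0)
--             continue
--         answer.append(id_dict[user])
--
--     return answer
-- ===== SOURCE B (Python) =====
-- def solution(id_list, report, k):
--     # Brute force, dict-free: split the deduplicated reports once into
--     # (reporter, target) pairs, then answer each queried id by scanning the
--     # pairs directly, recounting the target's reports inline.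
--     pairs = [tuple(r.split(" ")) for r in set(report)]
--
--     def successes(u):
--         total = 0
--         for reporter, target in pairs:
--             if reporter == u and sum(t == target for _, t in pairs) >= k:
--                 total += 1
--         return total
--
--     return [successes(u) for u in id_list]
-- ===== Notes on version B (the rewrite author's own statement) =====
-- stated objective: alternative
-- what changed: B drops both hash tallies: it splits the deduplicated reports once into (reporter, target) pairs and answers each queried id by a direct brute-force scan of the pairs, recounting the target's reports inline, instead of A's two staged dict-counting passes followed by lookups.
-- outside the precondition, e.g. on solution(['a'], ['a b c'], 1): A raises ValueError, B raises ValueError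
import Mathlib
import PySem

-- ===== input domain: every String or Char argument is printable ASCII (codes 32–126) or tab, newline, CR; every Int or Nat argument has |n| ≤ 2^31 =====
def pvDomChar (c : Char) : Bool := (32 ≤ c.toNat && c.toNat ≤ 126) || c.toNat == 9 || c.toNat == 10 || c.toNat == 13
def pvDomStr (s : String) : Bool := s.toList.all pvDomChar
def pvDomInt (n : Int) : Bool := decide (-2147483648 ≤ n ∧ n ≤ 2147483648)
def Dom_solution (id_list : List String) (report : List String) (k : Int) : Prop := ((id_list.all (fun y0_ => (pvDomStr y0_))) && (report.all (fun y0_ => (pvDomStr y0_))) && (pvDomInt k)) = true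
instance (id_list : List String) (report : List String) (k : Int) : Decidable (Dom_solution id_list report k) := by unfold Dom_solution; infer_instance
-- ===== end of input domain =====

-- B is dict-free brute force: it splits the deduplicated reports once into (reporter,
-- target) pairs and answers each queried id by scanning the pairs directly, recounting
-- the target's reports inline, instead of A's two staged dict-counting passes
-- (objective: alternative algorithm; B trades A's hash tallies for nested scans).

-- ===== PORT A =====
-- first loop: report_dict[reported] = number of (deduplicated) reports against `reported`
def aDict1 (rep : List String) : PySem.Dict String Int :=
  rep.foldl (fun d r =>
    match PySem.Str.split? r " " with          -- user, reported = report[i].split(" ")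
    | some [_user, reported] =>
        if d.contains reported = false then d.insert reported 1
        else d.insert reported (d.getD reported 0 + 1)
    | _ => d)                                   -- ValueError in Python: outside Pre_
    PySem.Dict.empty

-- second loop: id_dict[user] = number of successful reports filed by `user`
def aDict2 (rep : List String) (report_dict : PySem.Dict String Int) (k : Int) : PySem.Dict String Int :=
  rep.foldl (fun d r =>
    match PySem.Str.split? r " " with
    | some [user, reported] =>
        -- report_dict[reported]: the key is always present here (inserted by the first
        -- loop over the same list), so the total getD is exact
        if report_dict.getD reported 0 ≥ k then
          if d.contains user = false then d.insert user 1
          else d.insert user (d.getD user 0 + 1)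
        else d
    | _ => d)                                   -- ValueError in Python: outside Pre_
    PySem.Dict.empty

def solution (id_list : List String) (report : List String) (k : Int) : List Int :=
  let rep := PySem.Set.ofList report            -- report = list(set(report))
  let report_dict := aDict1 rep
  let id_dict := aDict2 rep report_dict k
  id_list.foldl (fun answer user =>
    if id_dict.contains user = false then answer ++ [0]
    else answer ++ [id_dict.getD user 0]) []

-- ===== PORT B =====
-- pairs = [tuple(r.split(" ")) for r in set(report)]; a tuple of variable arity is kept
-- as the split's List String (the for-loop unpacking below raises on arity ≠ 2)
def bPairs (rep : List String) : List (List String) :=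
  rep.map (fun r => (PySem.Str.split? r " ").getD [])

-- sum(t == target for _, t in pairs)
def bCount (pairs : List (List String)) (target : String) : Int :=
  pairs.foldl (fun n p => match p with
    | [_, t2] => if t2 == target then n + 1 else n
    | _ => n) 0                                 -- ValueError in Python: outside Pre_

-- successes(u): brute-force scan of the pairs with an inline recount of the target
def bSucc (pairs : List (List String)) (k : Int) (u : String) : Int :=
  pairs.foldl (fun total p => match p with
    | [reporter, target] =>
        if reporter == u && decide (bCount pairs target ≥ k) then total + 1 else total
    | _ => total) 0                             -- ValueError in Python: outside Pre_

def solution_alt (id_list : List String) (report : List String) (k : Int) : List Int :=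
  let pairs := bPairs (PySem.Set.ofList report)
  id_list.map (fun u => bSucc pairs k u)

-- ===== PRECONDITION & SPEC =====
-- Pre_ excludes exactly the report strings that do not split on " " into two fields:
-- there Python A raises ValueError at the tuple unpacking (and B raises the same way).
def Pre_solution (id_list : List String) (report : List String) (k : Int) : Prop :=
  ∀ r ∈ report, ((PySem.Str.split? r " ").getD []).length = 2
instance (id_list : List String) (report : List String) (k : Int) : Decidable (Pre_solution id_list report k) := by unfold Pre_solution; infer_instance

def pvWitness_solution : List String × List String × Int :=
  (["muzi", "frodo", "apeach"], ["apeach frodo", "muzi frodo", "apeach muzi"], 2)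

def Spec_solution (id_list : List String) (report : List String) (k : Int) (out : List Int) : Prop := out = solution_alt id_list report k
instance (id_list : List String) (report : List String) (k : Int) (out : List Int) : Decidable (Spec_solution id_list report k out) := by unfold Spec_solution; infer_instance

-- ===== CLAIM (what is proved, stated in full; the proofs are below) =====
def Claim_equal_solution : Prop := ∀ (id_list : List String) (report : List String) (k : Int), Dom_solution id_list report k → Pre_solution id_list report k → Spec_solution id_list report k (solution id_list report k)

-- ===== LEMMAS AND PROOFS =====

-- the two fields of r.split(" ") (used only by the proofs)
def pF (r : String) : List String := (PySem.Str.split? r " ").getD []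
def pU (r : String) : String := (pF r).getD 0 ""
def pV (r : String) : String := (pF r).getD 1 ""

theorem split_eq (r : String) (h : (pF r).length = 2) :
    PySem.Str.split? r " " = some [pU r, pV r] := by
  cases h' : PySem.Str.split? r " " with
  | none => simp [pF, h'] at h
  | some l =>
    simp only [pF, pU, pV, h', Option.getD_some] at h ⊢
    match l, h with
    | [a, b], _ => rfl

theorem dict_getD_not_contains {ν : Type} (d : PySem.Dict String ν) (s : String) (v : ν)
    (h : d.contains s = false) : d.getD s v = v := by
  have hf : List.find? (fun p => p.1 == s) d.items = none := by
    rw [List.find?_eq_none]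
    simp only [PySem.Dict.contains, List.any_eq_false] at h
    exact h
  simp [PySem.Dict.getD, PySem.Dict.get?, hf]

-- A's first loop is the standard counter fold over the reported users
theorem aDict1_eq (rep : List String) (hR : ∀ r ∈ rep, (pF r).length = 2) :
    aDict1 rep = (rep.map pV).foldl (fun d x => d.insert x (d.getD x 0 + 1)) PySem.Dict.empty := by
  unfold aDict1
  rw [List.foldl_map]
  apply PySem.List.foldl_congr_mem
  intro d r hr
  rw [split_eq r (hR r hr)]
  cases hc : d.contains (pV r) with
  | false => simp [dict_getD_not_contains _ _ _ hc]
  | true => simp [hc]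

theorem aDict1_getD (rep : List String) (hR : ∀ r ∈ rep, (pF r).length = 2) (v : String) :
    (aDict1 rep).getD v 0 = ((rep.map pV).count v : Int) := by
  rw [aDict1_eq rep hR, PySem.Dict.getD_foldl_insert_add_one]
  simp [PySem.Dict.getD, PySem.Dict.get?, PySem.Dict.empty]

theorem foldl_if_filter {α β : Type} (l : List α) (p : α → Bool) (f : β → α → β) (i : β) :
    l.foldl (fun d x => if p x = true then f d x else d) i = (l.filter p).foldl f i := by
  induction l generalizing i with
  | nil => rfl
  | cons a t ih => by_cases h : p a = true <;> simp [h, ih]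

-- A's second loop counts, per reporter, the deduplicated reports whose target is banned
theorem aDict2_getD (rep : List String) (hR : ∀ r ∈ rep, (pF r).length = 2) (k : Int) (u : String) :
    (aDict2 rep (aDict1 rep) k).getD u 0 =
      (((rep.filter (fun r => decide (((rep.map pV).count (pV r) : Int) ≥ k))).map pU).count u : Int) := by
  unfold aDict2
  have h1 : rep.foldl (fun d r =>
      match PySem.Str.split? r " " with
      | some [user, reported] =>
          if (aDict1 rep).getD reported 0 ≥ k then
            if d.contains user = false then d.insert user 1
            else d.insert user (d.getD user 0 + 1)
          else d
      | _ => d) (PySem.Dict.empty : PySem.Dict String Int)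
    = rep.foldl (fun d r =>
        if (decide (((rep.map pV).count (pV r) : Int) ≥ k)) = true then
          d.insert (pU r) (d.getD (pU r) 0 + 1) else d) (PySem.Dict.empty : PySem.Dict String Int) := by
    apply PySem.List.foldl_congr_mem
    intro d r hr
    rw [split_eq r (hR r hr)]
    dsimp only
    rw [aDict1_getD rep hR]
    simp only [decide_eq_true_eq]
    by_cases hk : ((rep.map pV).count (pV r) : Int) ≥ k
    · simp only [hk, if_pos]
      cases hc : d.contains (pU r) with
      | false => simp [dict_getD_not_contains _ _ _ hc]
      | true => simp
    · simp [hk]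
  rw [h1, foldl_if_filter, ← List.foldl_map (f := pU)
        (g := fun (d : PySem.Dict String Int) x => d.insert x (d.getD x 0 + 1)),
      PySem.Dict.getD_foldl_insert_add_one]
  simp [PySem.Dict.getD, PySem.Dict.get?, PySem.Dict.empty]

-- under Pre_, every pair of B is the split's two fields
theorem bPairs_eq (rep : List String) (hR : ∀ r ∈ rep, (pF r).length = 2) :
    bPairs rep = rep.map (fun r => [pU r, pV r]) := by
  unfold bPairs
  apply List.map_congr_left
  intro r hr
  rw [split_eq r (hR r hr)]
  rfl

-- B's inline recount is the flat count of the target among the pairs' second fields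
theorem bCount_eq (rep : List String) (t : String) :
    bCount (rep.map (fun r => [pU r, pV r])) t = ((rep.map pV).count t : Int) := by
  unfold bCount
  rw [List.foldl_map]
  have h : (rep.foldl (fun n r => if pV r == t then n + 1 else n) 0 : Int)
      = ((rep.map pV).count t : Int) := by
    rw [← List.foldl_map (f := pV) (g := fun (n : Int) x => if x == t then n + 1 else n),
      PySem.List.foldl_beq_add_one]
    simp
  exact h

-- B's per-query scan is a countP over the deduplicated reports
theorem bSucc_eq (rep : List String) (k : Int) (u : String) :
    bSucc (rep.map (fun r => [pU r, pV r])) k u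
      = (rep.countP (fun r => (pU r == u) && decide (((rep.map pV).count (pV r) : Int) ≥ k)) : Int) := by
  unfold bSucc
  rw [List.foldl_map]
  have h1 : rep.foldl (fun total r =>
      if pU r == u && decide (bCount (rep.map (fun r => [pU r, pV r])) (pV r) ≥ k)
      then total + 1 else total) (0 : Int)
    = rep.foldl (fun total r =>
      if (pU r == u) && decide (((rep.map pV).count (pV r) : Int) ≥ k)
      then total + 1 else total) (0 : Int) := by
    apply PySem.List.foldl_congr_mem
    intro total r _
    rw [bCount_eq rep (pV r)]
  rw [h1, PySem.List.foldl_if_add_one]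
  simp

-- the heart of the equivalence: A's hash tally equals B's brute-force count, per user
theorem core_eq (rep : List String) (hR : ∀ r ∈ rep, (pF r).length = 2) (k : Int) (u : String) :
    (aDict2 rep (aDict1 rep) k).getD u 0 = bSucc (bPairs rep) k u := by
  rw [bPairs_eq rep hR, bSucc_eq, aDict2_getD rep hR k u]
  congr 1
  rw [List.count_eq_countP, List.countP_map, List.countP_filter]
  apply List.countP_congr
  intro r hr
  simp [Function.comp]

-- ===== VERDICT (by name: the statement is the Claim_ definition above) =====
theorem solution_spec : Claim_equal_solution := by
  intro id_list report k _hdom hpre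
  unfold Spec_solution solution solution_alt
  have hR : ∀ r ∈ PySem.Set.ofList report, (pF r).length = 2 := by
    intro r hr
    exact hpre r ((PySem.Set.mem_ofList report r).1 hr)
  have h1 : id_list.foldl (fun answer user =>
      if (aDict2 (PySem.Set.ofList report) (aDict1 (PySem.Set.ofList report)) k).contains user = false
      then answer ++ [0]
      else answer ++ [(aDict2 (PySem.Set.ofList report) (aDict1 (PySem.Set.ofList report)) k).getD user 0]) []
      = id_list.foldl (fun answer user =>
          answer ++ [(aDict2 (PySem.Set.ofList report) (aDict1 (PySem.Set.ofList report)) k).getD user 0]) [] := by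
    apply PySem.List.foldl_congr_mem
    intro acc x hx
    cases hc : (aDict2 (PySem.Set.ofList report) (aDict1 (PySem.Set.ofList report)) k).contains x with
    | false => rw [if_pos rfl, dict_getD_not_contains _ _ _ hc]
    | true => simp
  rw [h1, PySem.List.foldl_append_singleton_eq_map, List.nil_append]
  apply List.map_congr_left
  intro u _
  exact core_eq _ hR k u
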